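-- pv_equiv track=rewrite | github.com/monkeprogrammer01/Re-charge-Lab | main/services.py | extract_mood_and_reason
-- ===== SOURCE A (Python) =====
-- def extract_mood_and_reason(bot_reply):
--     mood, reason, language = "neutral", "", "unknown"
--     lines = bot_reply.splitlines()
--     for line in lines:
--         low = line.lower()
--         if low.startswith("mood:"):
--             mood = low.replace("mood:", "").strip()
--         elif low.startswith("reason:"):
--             reason = low.replace("reason:", "").strip()
--         elif low.startswith("language:"):
--             language = low.replace("language:", "").strip()
--     return mood, reason, language
-- ===== SOURCE B (Python) =====
-- def _last_field(lows, prefix, default):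
--     # scan backwards: the last matching line wins
--     for low in reversed(lows):
--         if low.startswith(prefix):
--             return low.replace(prefix, "").strip()
--     return default
--
--
-- def extract_mood_and_reason(bot_reply):
--     lows = [line.lower() for line in bot_reply.splitlines()]
--     return (_last_field(lows, "mood:", "neutral"),
--             _last_field(lows, "reason:", ""),
--             _last_field(lows, "language:", "unknown"))
-- ===== Notes on version B (the rewrite author's own statement) =====
-- stated objective: alternative
-- what changed: Replaces A's single line-major if/elif fold over all lines with a field-major decomposition: one helper scans the lowercased lines backwards and early-returns at the last matching prefix, called once per field.
import Mathlib
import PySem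

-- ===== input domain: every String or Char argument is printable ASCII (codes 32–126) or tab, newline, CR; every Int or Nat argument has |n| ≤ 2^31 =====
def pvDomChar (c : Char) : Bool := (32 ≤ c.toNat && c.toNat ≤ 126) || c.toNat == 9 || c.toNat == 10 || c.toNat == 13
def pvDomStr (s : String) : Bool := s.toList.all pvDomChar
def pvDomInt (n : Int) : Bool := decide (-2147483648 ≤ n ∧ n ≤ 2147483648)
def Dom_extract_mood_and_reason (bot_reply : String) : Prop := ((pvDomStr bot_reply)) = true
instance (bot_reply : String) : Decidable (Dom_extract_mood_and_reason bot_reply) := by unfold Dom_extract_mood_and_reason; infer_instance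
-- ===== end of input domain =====

-- B replaces A's single line-major if/elif fold with a field-major decomposition:
-- one helper scans the lowercased lines backwards (last match wins), called once per field.

-- ===== PORT A =====
-- loop body of A's for-loop
def stepA (st : String × String × String) (line : String) : String × String × String :=
  let low := PySem.Str.lower line
  if PySem.Str.startswith low "mood:" then
    (PySem.Str.strip (PySem.Str.replace low "mood:" ""), st.2.1, st.2.2)
  else if PySem.Str.startswith low "reason:" then
    (st.1, PySem.Str.strip (PySem.Str.replace low "reason:" ""), st.2.2)
  else if PySem.Str.startswith low "language:" then
    (st.1, st.2.1, PySem.Str.strip (PySem.Str.replace low "language:" ""))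
  else st

def extract_mood_and_reason (bot_reply : String) : String × String × String :=
  (PySem.Str.splitlines bot_reply).foldl stepA ("neutral", "", "unknown")

-- ===== PORT B =====
-- helper `_last_field`: backwards scan with early return, else the default
def lastField : List String → String → String → String
  | [], _, default => default
  | low :: rest, pre, default =>
      if PySem.Str.startswith low pre then PySem.Str.strip (PySem.Str.replace low pre "")
      else lastField rest pre default

def extract_mood_and_reason_alt (bot_reply : String) : String × String × String :=
  let lows := (PySem.Str.splitlines bot_reply).map PySem.Str.lower
  (lastField lows.reverse "mood:" "neutral",
   lastField lows.reverse "reason:" "",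
   lastField lows.reverse "language:" "unknown")

-- ===== PRECONDITION & SPEC =====
def Spec_extract_mood_and_reason (bot_reply : String) (out : String × String × String) : Prop := out = extract_mood_and_reason_alt bot_reply
instance (bot_reply : String) (out : String × String × String) : Decidable (Spec_extract_mood_and_reason bot_reply out) := by unfold Spec_extract_mood_and_reason; infer_instance

-- ===== CLAIM (what is proved, stated in full; the proofs are below) =====
def Claim_equal_extract_mood_and_reason : Prop := ∀ (bot_reply : String), Dom_extract_mood_and_reason bot_reply → Spec_extract_mood_and_reason bot_reply (extract_mood_and_reason bot_reply)

-- ===== LEMMAS AND PROOFS =====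

theorem lastField_append (l : List String) (x pre d : String) :
    lastField (l ++ [x]) pre d
      = lastField l pre (if PySem.Str.startswith x pre then PySem.Str.strip (PySem.Str.replace x pre "") else d) := by
  induction l with
  | nil => simp [lastField]
  | cons a t ih => simp [lastField, ih]

-- two prefixes with different first characters cannot both be prefixes of s
-- two prefixes with different first characters cannot both be prefixes of s
theorem startswith_disjoint (s p q : List Char) (a b : Char) (hab : a ≠ b)
    (hp : PySem.Chars.startswith s (a :: p) = true) :
    PySem.Chars.startswith s (b :: q) = false := by
  by_contra h
  rw [Bool.not_eq_false, PySem.Chars.startswith_iff] at h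
  rw [PySem.Chars.startswith_iff] at hp
  obtain ⟨t1, h1⟩ := hp
  obtain ⟨t2, h2⟩ := h
  rw [← h1] at h2
  simp at h2
  exact hab h2.1.symm

theorem sw_mr (s : List Char) (h : PySem.Chars.startswith s ['m','o','o','d',':'] = true) :
    PySem.Chars.startswith s ['r','e','a','s','o','n',':'] = false :=
  startswith_disjoint s _ _ 'm' 'r' (by decide) h

theorem sw_ml (s : List Char) (h : PySem.Chars.startswith s ['m','o','o','d',':'] = true) :
    PySem.Chars.startswith s ['l','a','n','g','u','a','g','e',':'] = false :=
  startswith_disjoint s _ _ 'm' 'l' (by decide) h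

theorem sw_rl (s : List Char) (h : PySem.Chars.startswith s ['r','e','a','s','o','n',':'] = true) :
    PySem.Chars.startswith s ['l','a','n','g','u','a','g','e',':'] = false :=
  startswith_disjoint s _ _ 'r' 'l' (by decide) h

theorem main_lemma (lines : List String) (st : String × String × String) :
    lines.foldl stepA st
    = (lastField (lines.map PySem.Str.lower).reverse "mood:" st.1,
       lastField (lines.map PySem.Str.lower).reverse "reason:" st.2.1,
       lastField (lines.map PySem.Str.lower).reverse "language:" st.2.2) := by
  induction lines generalizing st with
  | nil => simp [lastField]
  | cons line rest ih =>
    simp only [List.foldl_cons, List.map_cons, List.reverse_cons, lastField_append, ih]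
    by_cases h1 : PySem.Chars.startswith (PySem.Chars.lower line.toList) ['m','o','o','d',':'] = true
    · have h2 := sw_mr _ h1
      have h3 := sw_ml _ h1
      simp [stepA, PySem.Str.startswith, h1, h2, h3]
    · by_cases h2 : PySem.Chars.startswith (PySem.Chars.lower line.toList) ['r','e','a','s','o','n',':'] = true
      · have h3 := sw_rl _ h2
        simp [stepA, PySem.Str.startswith, h1, h2, h3]
      · by_cases h3 : PySem.Chars.startswith (PySem.Chars.lower line.toList) ['l','a','n','g','u','a','g','e',':'] = true
        · simp [stepA, PySem.Str.startswith, h1, h2, h3]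
        · simp [stepA, PySem.Str.startswith, h1, h2, h3]

-- ===== VERDICT (by name: the statement is the Claim_ definition above) =====
theorem extract_mood_and_reason_spec : Claim_equal_extract_mood_and_reason := by
  intro bot_reply _
  unfold Spec_extract_mood_and_reason extract_mood_and_reason extract_mood_and_reason_alt
  exact main_lemma (PySem.Str.splitlines bot_reply) ("neutral", "", "unknown")
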